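-- pv_equiv track=rewrite | github.com/zena876/python-homework-storage-2025 | Алпацкая Марина Фёдоровна/LAB02/task02.py | parsing
-- ===== SOURCE A (Python) =====
-- def parsing(stroke):
--     stroke = stroke.strip()
--     list_str = stroke.split()
--     mark_wor = 0
--     mark_num = 0
--     mark_znak = 0
--     mark_space = 0
--     for word in list_str:
--         mark_space = mark_space + word.count(" ")
--         for i in word:
--             if i.isalpha() == True:
--                 mark_wor = mark_wor + 1
--             elif i.isdigit() == True:
--                 mark_num = mark_num  + 1
--             else:
--                 mark_znak = mark_znak +1
--
--     dictionaries = {"Слов": len(list_str), "Букв": mark_wor, "Цифр": mark_num, "Пробелов": mark_space, "Знаков препинания": mark_znak}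
--     return dictionaries
-- ===== SOURCE B (Python) =====
-- def parsing(stroke):
--     # Words come from split(); letters/digits are counted once over the joined
--     # characters, and punctuation is derived arithmetically.  split() discards
--     # all whitespace, so the space count is 0 by construction.
--     words = stroke.split()
--     chars = "".join(words)
--     letters = sum(c.isalpha() for c in chars)
--     digits = sum(c.isdigit() for c in chars)
--     return {"Слов": len(words), "Букв": letters, "Цифр": digits,
--             "Пробелов": 0, "Знаков препинания": len(chars) - letters - digits}
-- ===== Notes on version B (the rewrite author's own statement) =====
-- stated objective: simpler
-- what changed: B counts letters and digits in one comprehension pass over the joined words and derives the punctuation count arithmetically (total - letters - digits) and the space count as the constant 0, instead of A's nested loops maintaining four running counters with an else-branch.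
import Mathlib
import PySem

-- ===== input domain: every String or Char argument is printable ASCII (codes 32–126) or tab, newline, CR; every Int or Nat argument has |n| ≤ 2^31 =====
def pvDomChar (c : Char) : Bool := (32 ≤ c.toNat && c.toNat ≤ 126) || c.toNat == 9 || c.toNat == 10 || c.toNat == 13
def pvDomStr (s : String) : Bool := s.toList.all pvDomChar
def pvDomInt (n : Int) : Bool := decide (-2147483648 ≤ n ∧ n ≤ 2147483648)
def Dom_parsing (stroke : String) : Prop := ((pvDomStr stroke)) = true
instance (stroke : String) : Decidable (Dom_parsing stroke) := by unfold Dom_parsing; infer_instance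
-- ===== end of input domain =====

-- B counts letters/digits in one pass over the joined words and derives punctuation by
-- subtraction (and the always-zero space count as 0) instead of A's four else-counters.

-- ===== PORT A =====
def parsing (stroke : String) : List (String × Int) :=
  let stroke := PySem.Str.strip stroke
  let list_str := PySem.Str.split₀ stroke
  let st : Int × Int × Int × Int :=            -- (mark_wor, mark_num, mark_znak, mark_space)
    list_str.foldl (fun st word =>
      let st : Int × Int × Int × Int :=
        (st.1, st.2.1, st.2.2.1, st.2.2.2 + (PySem.Str.count word " " : Int))
      word.toList.foldl (fun st i =>
        if PySem.Chars.isalpha i = true then (st.1 + 1, st.2.1, st.2.2.1, st.2.2.2)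
        else if PySem.Chars.isdigit i = true then (st.1, st.2.1 + 1, st.2.2.1, st.2.2.2)
        else (st.1, st.2.1, st.2.2.1 + 1, st.2.2.2)) st)
      (0, 0, 0, 0)
  [("Слов", PySem.List.len list_str), ("Букв", st.1), ("Цифр", st.2.1),
   ("Пробелов", st.2.2.2), ("Знаков препинания", st.2.2.1)]

-- ===== PORT B =====
def parsing_alt (stroke : String) : List (String × Int) :=
  let words := PySem.Str.split₀ stroke
  let chars := (PySem.Str.join "" words).toList
  let letters : Int := chars.countP (fun c => PySem.Chars.isalpha c)
  let digits : Int := chars.countP (fun c => PySem.Chars.isdigit c)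
  [("Слов", (words.length : Int)), ("Букв", letters), ("Цифр", digits),
   ("Пробелов", 0), ("Знаков препинания", (chars.length : Int) - letters - digits)]

-- ===== PRECONDITION & SPEC =====
def Spec_parsing (stroke : String) (out : List (String × Int)) : Prop := out = parsing_alt stroke
instance (stroke : String) (out : List (String × Int)) : Decidable (Spec_parsing stroke out) := by unfold Spec_parsing; infer_instance

-- ===== CLAIM (what is proved, stated in full; the proofs are below) =====
def Claim_equal_parsing : Prop := ∀ (stroke : String), Dom_parsing stroke → Spec_parsing stroke (parsing stroke)

-- ===== LEMMAS AND PROOFS =====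

-- split₀ ignores leading whitespace
theorem split_go_lstrip (l : List Char) (acc : List (List Char)) :
    PySem.Chars.split₀.go (List.dropWhile PySem.Chars.isspace l) [] acc
      = PySem.Chars.split₀.go l [] acc := by
  induction l generalizing acc with
  | nil => rfl
  | cons c rest ih =>
    by_cases h : PySem.Chars.isspace c = true
    · simp [List.dropWhile, h, PySem.Chars.split₀.go, ih]
    · simp [List.dropWhile, h]

-- split₀.go on an all-whitespace tail just flushes the current word
theorem split_go_allspace (ws : List Char) (cur : List Char) (acc : List (List Char))
    (h : ∀ c ∈ ws, PySem.Chars.isspace c = true) :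
    PySem.Chars.split₀.go ws cur acc
      = (if cur.isEmpty then acc.reverse else (cur.reverse :: acc).reverse) := by
  induction ws generalizing cur acc with
  | nil => rfl
  | cons c rest ih =>
    have hc : PySem.Chars.isspace c = true := h c (by simp)
    have hrest : ∀ x ∈ rest, PySem.Chars.isspace x = true := fun x hx => h x (by simp [hx])
    by_cases hcur : cur.isEmpty
    · simp [PySem.Chars.split₀.go, hc, hcur, ih _ _ hrest]
    · simp [PySem.Chars.split₀.go, hc, hcur, ih _ _ hrest]

-- split₀.go drops an all-whitespace suffix
theorem split_go_rstrip (m ws : List Char) (cur : List Char) (acc : List (List Char))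
    (h : ∀ c ∈ ws, PySem.Chars.isspace c = true) :
    PySem.Chars.split₀.go (m ++ ws) cur acc = PySem.Chars.split₀.go m cur acc := by
  induction m generalizing cur acc with
  | nil =>
    simp only [List.nil_append]
    rw [split_go_allspace ws cur acc h]
    rfl
  | cons c rest ih =>
    by_cases hc : PySem.Chars.isspace c = true
    · by_cases hcur : cur.isEmpty <;>
        simp [PySem.Chars.split₀.go, hc, hcur, ih]
    · simp [PySem.Chars.split₀.go, hc, ih]

-- split₀ of the stripped string = split₀ of the string
theorem split₀_strip (l : List Char) :
    PySem.Chars.split₀ (PySem.Chars.strip l) = PySem.Chars.split₀ l := by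
  unfold PySem.Chars.strip PySem.Chars.split₀
  have hdecomp : PySem.Chars.lstrip l
      = PySem.Chars.rstrip (PySem.Chars.lstrip l)
        ++ (List.takeWhile PySem.Chars.isspace (PySem.Chars.lstrip l).reverse).reverse := by
    unfold PySem.Chars.rstrip
    rw [← List.reverse_append, List.takeWhile_append_dropWhile, List.reverse_reverse]
  have hws : ∀ c ∈ (List.takeWhile PySem.Chars.isspace (PySem.Chars.lstrip l).reverse).reverse,
      PySem.Chars.isspace c = true := by
    intro c hc
    exact List.mem_takeWhile_imp (List.mem_reverse.mp hc)
  calc PySem.Chars.split₀.go (PySem.Chars.rstrip (PySem.Chars.lstrip l)) [] []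
      = PySem.Chars.split₀.go (PySem.Chars.lstrip l) [] [] := by
        conv_rhs => rw [hdecomp]
        rw [split_go_rstrip _ _ _ _ hws]
    _ = PySem.Chars.split₀.go l [] [] := split_go_lstrip l []

-- every character of every word produced by split₀.go is non-whitespace
theorem split_go_nospace (l cur : List Char) (acc : List (List Char))
    (hcur : ∀ c ∈ cur, PySem.Chars.isspace c = false)
    (hacc : ∀ w ∈ acc, ∀ c ∈ w, PySem.Chars.isspace c = false) :
    ∀ w ∈ PySem.Chars.split₀.go l cur acc, ∀ c ∈ w, PySem.Chars.isspace c = false := by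
  induction l generalizing cur acc with
  | nil =>
    intro w hw
    by_cases h : cur.isEmpty
    · simp only [PySem.Chars.split₀.go, h, if_true, List.mem_reverse] at hw
      exact hacc w hw
    · simp [PySem.Chars.split₀.go, h] at hw
      rcases hw with h1 | h2
      · exact hacc w h1
      · subst h2; intro c hc; exact hcur c (List.mem_reverse.mp hc)
  | cons c rest ih =>
    by_cases hc : PySem.Chars.isspace c = true
    · by_cases h : cur.isEmpty
      · simp only [PySem.Chars.split₀.go, hc, h, if_true]
        exact ih [] acc (by simp) hacc
      · simp only [PySem.Chars.split₀.go, hc, h, if_false]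
        refine ih [] _ (by simp) ?_
        intro w hw
        rcases List.mem_cons.mp hw with h1 | h2
        · subst h1; intro x hx; exact hcur x (List.mem_reverse.mp hx)
        · exact hacc w h2
    · simp only [PySem.Chars.split₀.go, hc, if_false]
      refine ih (c :: cur) acc ?_ hacc
      intro x hx
      rcases List.mem_cons.mp hx with h1 | h2
      · subst h1; simpa using hc
      · exact hcur x h2

-- counting a single character that does not occur gives 0
theorem count_go_notmem (fuel : Nat) (l : List Char) (acc : Nat)
    (h : ' ' ∉ l) : PySem.Chars.count.go [' '] fuel l acc = acc := by
  induction fuel generalizing l acc with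
  | zero => rfl
  | succ n ih =>
    cases l with
    | nil => rfl
    | cons c rest =>
      have hc : c ≠ ' ' := fun hc => h (by simp [hc])
      have hpre : List.isPrefixOf [' '] (c :: rest) = false := by
        simp [List.isPrefixOf]
        intro hcc; exact hc hcc.symm
      simp only [PySem.Chars.count.go, hpre]
      exact ih rest acc (fun hm => h (by simp [hm]))

theorem count_space_zero (w : List Char)
    (h : ∀ c ∈ w, PySem.Chars.isspace c = false) :
    PySem.Chars.count w [' '] = 0 := by
  have hsp : ' ' ∉ w := by
    intro hm
    have := h ' ' hm
    simp [PySem.Chars.isspace] at this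
  simp [PySem.Chars.count, count_go_notmem w.length w 0 hsp]

-- isalpha and isdigit are disjoint
theorem alpha_not_digit (c : Char) (h : PySem.Chars.isalpha c = true) :
    PySem.Chars.isdigit c = false := by
  simp [PySem.Chars.isalpha, PySem.Chars.isupper, PySem.Chars.islower,
    PySem.Chars.isdigit, Char.le_def, UInt32.le_iff_toNat_le] at *
  rcases h with ⟨h1, h2⟩ | ⟨h1, h2⟩ <;> omega

-- A's inner character loop, characterised
theorem inner_loop (cs : List Char) (a b c d : Int) :
    cs.foldl (fun st i =>
        if PySem.Chars.isalpha i = true then (st.1 + 1, st.2.1, st.2.2.1, st.2.2.2)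
        else if PySem.Chars.isdigit i = true then (st.1, st.2.1 + 1, st.2.2.1, st.2.2.2)
        else (st.1, st.2.1, st.2.2.1 + 1, st.2.2.2)) ((a, b, c, d) : Int × Int × Int × Int)
      = (a + cs.countP (fun x => PySem.Chars.isalpha x),
         b + cs.countP (fun x => PySem.Chars.isdigit x),
         c + ((cs.length : Int) - cs.countP (fun x => PySem.Chars.isalpha x)
              - cs.countP (fun x => PySem.Chars.isdigit x)), d) := by
  induction cs generalizing a b c d with
  | nil => simp
  | cons x rest ih =>
    by_cases hx : PySem.Chars.isalpha x = true
    · have hd := alpha_not_digit x hx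
      simp only [List.foldl_cons, hx, if_true, ih, List.countP_cons, hx, hd,
        List.length_cons]
      refine Prod.ext ?_ (Prod.ext ?_ (Prod.ext ?_ rfl)) <;> simp <;> push_cast <;> ring
    · by_cases hdx : PySem.Chars.isdigit x = true
      · simp only [List.foldl_cons, hx, if_false, hdx, if_true, ih, List.countP_cons,
          hx, hdx, List.length_cons]
        refine Prod.ext ?_ (Prod.ext ?_ (Prod.ext ?_ rfl)) <;> simp <;> push_cast <;> ring
      · simp only [List.foldl_cons, hx, if_false, hdx, ih, List.countP_cons,
          hx, hdx, List.length_cons]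
        refine Prod.ext ?_ (Prod.ext ?_ (Prod.ext ?_ rfl)) <;> simp <;> push_cast <;> ring

-- A's outer word loop, characterised over the flattened characters
theorem outer_loop (ws : List (List Char)) (a b c d : Int)
    (h : ∀ w ∈ ws, ∀ ch ∈ w, PySem.Chars.isspace ch = false) :
    ws.foldl (fun st w =>
        w.foldl (fun st i =>
            if PySem.Chars.isalpha i = true then (st.1 + 1, st.2.1, st.2.2.1, st.2.2.2)
            else if PySem.Chars.isdigit i = true then (st.1, st.2.1 + 1, st.2.2.1, st.2.2.2)
            else (st.1, st.2.1, st.2.2.1 + 1, st.2.2.2))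
          ((st.1, st.2.1, st.2.2.1, st.2.2.2 + (PySem.Chars.count w [' '] : Int)) : Int × Int × Int × Int))
        ((a, b, c, d) : Int × Int × Int × Int)
      = (a + ws.flatten.countP (fun x => PySem.Chars.isalpha x),
         b + ws.flatten.countP (fun x => PySem.Chars.isdigit x),
         c + ((ws.flatten.length : Int)
              - ws.flatten.countP (fun x => PySem.Chars.isalpha x)
              - ws.flatten.countP (fun x => PySem.Chars.isdigit x)), d) := by
  induction ws generalizing a b c d with
  | nil => simp
  | cons w rest ih =>
    have hw := h w (by simp)
    have hrest : ∀ v ∈ rest, ∀ ch ∈ v, PySem.Chars.isspace ch = false :=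
      fun v hv => h v (by simp [hv])
    rw [List.foldl_cons]
    show List.foldl _ (w.foldl _ ((a, b, c, d + (PySem.Chars.count w [' '] : Int)) : Int × Int × Int × Int)) rest = _
    rw [count_space_zero w hw]
    simp only [Nat.cast_zero, add_zero]
    rw [inner_loop, ih _ _ _ _ hrest]
    simp only [List.flatten_cons, List.countP_append, List.length_append]
    refine Prod.ext ?_ (Prod.ext ?_ (Prod.ext ?_ rfl)) <;> simp <;> push_cast <;> ring

-- joining with the empty separator is flattening
theorem flatten_intersperse_nil (l : List (List Char)) :
    (List.intersperse [] l).flatten = l.flatten := by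
  induction l with
  | nil => rfl
  | cons a t ih =>
    cases t with
    | nil => rfl
    | cons b r =>
      rw [show List.intersperse [] (a :: b :: r) = a :: [] :: List.intersperse [] (b :: r) by
        simp [List.intersperse]]
      simp only [List.flatten_cons] at *
      simp [ih]

-- ===== VERDICT (by name: the statement is the Claim_ definition above) =====
theorem parsing_spec : Claim_equal_parsing := by
  intro stroke _
  unfold Spec_parsing parsing parsing_alt
  have hmapS : List.map String.toList (PySem.Str.split₀ (PySem.Str.strip stroke))
      = PySem.Chars.split₀ stroke.toList := by
    rw [PySem.Str.split₀_map_toList, PySem.Str.toList_strip, split₀_strip]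
  have hinj : Function.Injective (List.map String.toList) :=
    List.map_injective_iff.mpr (fun a b hab => by
      exact String.ext (by simpa [String.toList] using hab))
  have hsplit : PySem.Str.split₀ (PySem.Str.strip stroke) = PySem.Str.split₀ stroke := by
    apply hinj
    rw [hmapS, PySem.Str.split₀_map_toList]
  simp only [hsplit]
  have hmap : List.map String.toList (PySem.Str.split₀ stroke)
      = PySem.Chars.split₀ stroke.toList := by rw [PySem.Str.split₀_map_toList]
  have hns : ∀ w ∈ PySem.Chars.split₀ stroke.toList, ∀ c ∈ w, PySem.Chars.isspace c = false :=
    split_go_nospace stroke.toList [] [] (by simp) (by simp)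
  have hA : (PySem.Str.split₀ stroke).foldl (fun st word =>
      let st : Int × Int × Int × Int :=
        (st.1, st.2.1, st.2.2.1, st.2.2.2 + (PySem.Str.count word " " : Int))
      word.toList.foldl (fun st i =>
        if PySem.Chars.isalpha i = true then (st.1 + 1, st.2.1, st.2.2.1, st.2.2.2)
        else if PySem.Chars.isdigit i = true then (st.1, st.2.1 + 1, st.2.2.1, st.2.2.2)
        else (st.1, st.2.1, st.2.2.1 + 1, st.2.2.2)) st) ((0, 0, 0, 0) : Int × Int × Int × Int)
      = (PySem.Chars.split₀ stroke.toList).foldl (fun st w =>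
          w.foldl (fun st i =>
            if PySem.Chars.isalpha i = true then (st.1 + 1, st.2.1, st.2.2.1, st.2.2.2)
            else if PySem.Chars.isdigit i = true then (st.1, st.2.1 + 1, st.2.2.1, st.2.2.2)
            else (st.1, st.2.1, st.2.2.1 + 1, st.2.2.2))
          ((st.1, st.2.1, st.2.2.1, st.2.2.2 + (PySem.Chars.count w [' '] : Int)) : Int × Int × Int × Int))
        ((0, 0, 0, 0) : Int × Int × Int × Int) := by
    rw [← hmap, List.foldl_map]
    rfl
  have hjoin : (PySem.Str.join "" (PySem.Str.split₀ stroke)).toList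
      = (PySem.Chars.split₀ stroke.toList).flatten := by
    rw [PySem.Str.toList_join, hmap]
    simp [PySem.Chars.join, List.intercalate, flatten_intersperse_nil]
  have hlen : PySem.List.len (PySem.Str.split₀ stroke)
      = ((PySem.Str.split₀ stroke).length : Int) := by
    simp [PySem.List.len_eq]
  simp only [hA, outer_loop _ 0 0 0 0 hns, hjoin, hlen]
  simp
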